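-- pv_equiv track=rewrite | github.com/rohanfukat/n26_05 | backend/utils/classifier.py | classify_department
-- ===== SOURCE A (Python) =====
-- DEPARTMENT_MAP: dict[str, str] = {
--     "water": "BMC - Water Supply Department",
--     "pani": "BMC - Water Supply Department",
--     "pipeline": "BMC - Water Supply Department",
--     "leakage": "BMC - Water Supply Department",
--     "shortage": "BMC - Water Supply Department",
--     "road": "BMC - Roads & Infrastructure (PWD)",
--     "pothole": "BMC - Roads & Infrastructure (PWD)",
--     "footpath": "BMC - Roads & Infrastructure (PWD)",
--     "bridge": "BMC - Roads & Infrastructure (PWD)",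
--     "garbage": "BMC - Solid Waste Management",
--     "waste": "BMC - Solid Waste Management",
--     "dustbin": "BMC - Solid Waste Management",
--     "sewage": "BMC - Storm Water Drains",
--     "drainage": "BMC - Storm Water Drains",
--     "drain": "BMC - Storm Water Drains",
--     "flood": "BMC - Storm Water Drains",
--     "hygiene": "BMC - Public Health Department",
--     "sanitation": "BMC - Public Health Department",
--     "toilet": "BMC - Public Health Department",
--     "hospital": "BMC - Public Health Department",
--     "health": "BMC - Public Health Department",
--     "noise": "Mumbai Police",
--     "crime": "Mumbai Police",
--     "accident": "Mumbai Police",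
--     "traffic": "Mumbai Police",
--     "illegal": "Mumbai Police",
--     "electricity": "Maharashtra State Electricity Distribution Company (MSEDCL)",
--     "power": "Maharashtra State Electricity Distribution Company (MSEDCL)",
--     "light": "Maharashtra State Electricity Distribution Company (MSEDCL)",
--     "electric": "Maharashtra State Electricity Distribution Company (MSEDCL)",
--     "wire": "Maharashtra State Electricity Distribution Company (MSEDCL)",
--     "fire": "Mumbai Fire Brigade",
--     "emergency": "Mumbai Fire Brigade",
--     "gas leak": "Mumbai Fire Brigade",
--     "explosion": "Mumbai Fire Brigade",
--     "pollution": "Maharashtra Pollution Control Board (MPCB)",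
--     "construction": "Mumbai Metropolitan Region Development Authority (MMRDA)",
--     "slum": "Slum Rehabilitation Authority (SRA)",
-- }
--
-- def classify_department(text: str, category: str = "") -> str:
--     """
--     Return the best-matching department using keyword matching.
--     Falls back to 'General Administration (BMC)'.
--     """
--     lowered = text.lower()
--     keywords_sorted = sorted(DEPARTMENT_MAP.keys(), key=len, reverse=True)
--     for keyword in keywords_sorted:
--         if keyword in lowered:
--             return DEPARTMENT_MAP[keyword]
--     if category:
--         cat_lower = category.lower()
--         for keyword in keywords_sorted:
--             if keyword in cat_lower:
--                 return DEPARTMENT_MAP[keyword]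
--     return "General Administration (BMC)"
-- ===== SOURCE B (Python) =====
-- DEPARTMENTS: list[tuple[str, list[str]]] = [
--     ("BMC - Water Supply Department", ["water", "pani", "pipeline", "leakage", "shortage"]),
--     ("BMC - Roads & Infrastructure (PWD)", ["road", "pothole", "footpath", "bridge"]),
--     ("BMC - Solid Waste Management", ["garbage", "waste", "dustbin"]),
--     ("BMC - Storm Water Drains", ["sewage", "drainage", "drain", "flood"]),
--     ("BMC - Public Health Department", ["hygiene", "sanitation", "toilet", "hospital", "health"]),
--     ("Mumbai Police", ["noise", "crime", "accident", "traffic", "illegal"]),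
--     ("Maharashtra State Electricity Distribution Company (MSEDCL)",
--      ["electricity", "power", "light", "electric", "wire"]),
--     ("Mumbai Fire Brigade", ["fire", "emergency", "gas leak", "explosion"]),
--     ("Maharashtra Pollution Control Board (MPCB)", ["pollution"]),
--     ("Mumbai Metropolitan Region Development Authority (MMRDA)", ["construction"]),
--     ("Slum Rehabilitation Authority (SRA)", ["slum"]),
-- ]
--
--
-- def _best_department(s: str):
--     """Longest keyword occurring in s; keywords are scanned in table order and a
--     candidate replaces the current best only when STRICTLY longer, so among
--     equal-length matches the earliest one in the table wins (the same winner as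
--     a stable length-descending sort scanned front to back)."""
--     best_len = 0
--     best_dept = None
--     for dept, keywords in DEPARTMENTS:
--         for kw in keywords:
--             if len(kw) > best_len and kw in s:
--                 best_len, best_dept = len(kw), dept
--     return best_dept
--
--
-- def classify_department(text: str, category: str = "") -> str:
--     dept = _best_department(text.lower())
--     if dept is None and category:
--         dept = _best_department(category.lower())
--     return dept if dept is not None else "General Administration (BMC)"
-- ===== Notes on version B (the rewrite author's own statement) =====
-- stated objective: alternative
-- what changed: B drops A's flat keyword dict and its length-descending sort + first-hit scan; it keeps the keyword table grouped by department and makes one pass over it, keeping the longest matching keyword seen so far (replacing only when strictly longer, which preserves A's stable-sort tie-break of earliest-inserted among equal lengths).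
import Mathlib
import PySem

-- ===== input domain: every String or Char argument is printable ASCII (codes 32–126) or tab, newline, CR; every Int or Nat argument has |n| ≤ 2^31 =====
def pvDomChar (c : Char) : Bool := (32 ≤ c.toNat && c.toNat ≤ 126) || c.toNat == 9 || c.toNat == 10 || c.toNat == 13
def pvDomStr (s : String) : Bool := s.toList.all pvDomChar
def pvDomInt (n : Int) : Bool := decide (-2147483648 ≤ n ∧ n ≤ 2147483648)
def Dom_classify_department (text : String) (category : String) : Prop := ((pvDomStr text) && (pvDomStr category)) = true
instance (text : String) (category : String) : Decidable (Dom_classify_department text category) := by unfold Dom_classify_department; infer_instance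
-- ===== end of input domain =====

set_option maxRecDepth 100000
set_option maxHeartbeats 1000000


-- B replaces A's flat keyword dict + length-descending sort + first-hit scan with a
-- department-grouped keyword table scanned once while keeping the strictly-longest match
-- seen so far (objective: alternative decomposition; same result, no sort, no dict lookup).

-- ===== PORT A =====
-- the module-level DEPARTMENT_MAP dict, in insertion order
def deptItems : List (String × String) :=
  [("water", "BMC - Water Supply Department"),
   ("pani", "BMC - Water Supply Department"),
   ("pipeline", "BMC - Water Supply Department"),
   ("leakage", "BMC - Water Supply Department"),
   ("shortage", "BMC - Water Supply Department"),
   ("road", "BMC - Roads & Infrastructure (PWD)"),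
   ("pothole", "BMC - Roads & Infrastructure (PWD)"),
   ("footpath", "BMC - Roads & Infrastructure (PWD)"),
   ("bridge", "BMC - Roads & Infrastructure (PWD)"),
   ("garbage", "BMC - Solid Waste Management"),
   ("waste", "BMC - Solid Waste Management"),
   ("dustbin", "BMC - Solid Waste Management"),
   ("sewage", "BMC - Storm Water Drains"),
   ("drainage", "BMC - Storm Water Drains"),
   ("drain", "BMC - Storm Water Drains"),
   ("flood", "BMC - Storm Water Drains"),
   ("hygiene", "BMC - Public Health Department"),
   ("sanitation", "BMC - Public Health Department"),
   ("toilet", "BMC - Public Health Department"),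
   ("hospital", "BMC - Public Health Department"),
   ("health", "BMC - Public Health Department"),
   ("noise", "Mumbai Police"),
   ("crime", "Mumbai Police"),
   ("accident", "Mumbai Police"),
   ("traffic", "Mumbai Police"),
   ("illegal", "Mumbai Police"),
   ("electricity", "Maharashtra State Electricity Distribution Company (MSEDCL)"),
   ("power", "Maharashtra State Electricity Distribution Company (MSEDCL)"),
   ("light", "Maharashtra State Electricity Distribution Company (MSEDCL)"),
   ("electric", "Maharashtra State Electricity Distribution Company (MSEDCL)"),
   ("wire", "Maharashtra State Electricity Distribution Company (MSEDCL)"),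
   ("fire", "Mumbai Fire Brigade"),
   ("emergency", "Mumbai Fire Brigade"),
   ("gas leak", "Mumbai Fire Brigade"),
   ("explosion", "Mumbai Fire Brigade"),
   ("pollution", "Maharashtra Pollution Control Board (MPCB)"),
   ("construction", "Mumbai Metropolitan Region Development Authority (MMRDA)"),
   ("slum", "Slum Rehabilitation Authority (SRA)")]

def deptMap : PySem.Dict String String := PySem.Dict.ofList deptItems

-- A's 'for keyword in keywords_sorted: if keyword in lowered: return ...' loop: first
-- element satisfying p (the surrounding code then looks the keyword up in the dict).
def pyFirstMatch {α : Type} (p : α → Bool) : List α → Option α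
  | [] => none
  | x :: t => if p x then some x else pyFirstMatch p t

def classify_department (text : String) (category : String) : String :=
  let lowered := PySem.Str.lower text
  let keywords_sorted := PySem.List.sorted deptMap.keys PySem.Str.len true
  match pyFirstMatch (fun keyword => PySem.Str.isIn keyword lowered) keywords_sorted with
  | some keyword => (deptMap.get? keyword).getD ""  -- DEPARTMENT_MAP[keyword]; keyword ∈ keys, so KeyError is unreachable
  | none =>
    if category ≠ "" then
      let cat_lower := PySem.Str.lower category
      match pyFirstMatch (fun keyword => PySem.Str.isIn keyword cat_lower) keywords_sorted with
      | some keyword => (deptMap.get? keyword).getD ""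
      | none => "General Administration (BMC)"
    else "General Administration (BMC)"

-- ===== PORT B =====
-- Source B's DEPARTMENTS: the keyword table grouped by department, a different data layout
def deptGroups : List (String × List String) :=
  [("BMC - Water Supply Department", ["water", "pani", "pipeline", "leakage", "shortage"]),
   ("BMC - Roads & Infrastructure (PWD)", ["road", "pothole", "footpath", "bridge"]),
   ("BMC - Solid Waste Management", ["garbage", "waste", "dustbin"]),
   ("BMC - Storm Water Drains", ["sewage", "drainage", "drain", "flood"]),
   ("BMC - Public Health Department", ["hygiene", "sanitation", "toilet", "hospital", "health"]),
   ("Mumbai Police", ["noise", "crime", "accident", "traffic", "illegal"]),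
   ("Maharashtra State Electricity Distribution Company (MSEDCL)",
    ["electricity", "power", "light", "electric", "wire"]),
   ("Mumbai Fire Brigade", ["fire", "emergency", "gas leak", "explosion"]),
   ("Maharashtra Pollution Control Board (MPCB)", ["pollution"]),
   ("Mumbai Metropolitan Region Development Authority (MMRDA)", ["construction"]),
   ("Slum Rehabilitation Authority (SRA)", ["slum"])]

-- Source B's _best_department: running (best_len, best_dept) over the grouped table;
-- a keyword replaces the best only when strictly longer
def bestDepartment (s : String) : Option String :=
  (deptGroups.foldl
    (fun acc g => g.2.foldl
      (fun acc kw =>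
        if decide (acc.1 < PySem.Str.len kw) && PySem.Str.isIn kw s then (PySem.Str.len kw, some g.1) else acc)
      acc)
    ((0 : Int), (none : Option String))).2

def classify_department_alt (text : String) (category : String) : String :=
  let dept := bestDepartment (PySem.Str.lower text)
  let dept := if dept = none ∧ category ≠ "" then bestDepartment (PySem.Str.lower category) else dept
  dept.getD "General Administration (BMC)"

-- ===== PRECONDITION & SPEC =====
def Spec_classify_department (text : String) (category : String) (out : String) : Prop := out = classify_department_alt text category
instance (text : String) (category : String) (out : String) : Decidable (Spec_classify_department text category out) := by unfold Spec_classify_department; infer_instance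

-- ===== CLAIM (what is proved, stated in full; the proofs are below) =====
def Claim_equal_classify_department : Prop := ∀ (text : String) (category : String), Dom_classify_department text category → Spec_classify_department text category (classify_department text category)

-- ===== LEMMAS AND PROOFS =====

-- the keyword list and its length-descending stable sort, as literals
def kwList : List String := deptItems.map Prod.fst

def kwSorted : List String :=
  ["construction", "electricity", "sanitation", "emergency", "explosion", "pollution", "pipeline", "shortage", "footpath", "drainage", "hospital", "accident", "electric", "gas leak", "leakage", "pothole", "garbage", "dustbin", "hygiene", "traffic", "illegal", "bridge", "sewage", "toilet", "health", "water", "waste", "drain", "flood", "noise", "crime", "power", "light", "pani", "road", "wire", "fire", "slum"]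

theorem hkeys : deptMap.keys = kwList := by decide

theorem hS : PySem.List.sorted kwList PySem.Str.len true = kwSorted := by decide

theorem pyFirstMatch_eq_none_iff {α : Type} (p : α → Bool) (l : List α) :
    pyFirstMatch p l = none ↔ ∀ x ∈ l, p x = false := by
  induction l with
  | nil => simp [pyFirstMatch]
  | cons x t ih =>
    by_cases hx : p x = true
    · simp [pyFirstMatch, hx]
    · have hx' : p x = false := by simpa using hx
      simp [pyFirstMatch, hx', ih]

theorem pyFirstMatch_eq_some {α : Type} {p : α → Bool} :
    ∀ {l : List α} {r : α}, pyFirstMatch p l = some r →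
      ∃ l1 l2, l = l1 ++ r :: l2 ∧ p r = true ∧ ∀ y ∈ l1, p y = false := by
  intro l
  induction l with
  | nil => intro r h; simp [pyFirstMatch] at h
  | cons x t ih =>
    intro r h
    by_cases hx : p x = true
    · simp [pyFirstMatch, hx] at h
      subst h
      exact ⟨[], t, by simp, hx, by simp⟩
    · simp [pyFirstMatch, hx] at h
      obtain ⟨l1, l2, hl, hr, hl1⟩ := ih h
      refine ⟨x :: l1, l2, by simp [hl], hr, ?_⟩
      intro y hy
      rcases List.mem_cons.mp hy with rfl | hy'
      · simpa using hx
      · exact hl1 y hy'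

-- the step of Python's max(…, key=f): replace only when strictly greater (first maximum wins)
def mstep {α : Type} (f : α → Int) (acc : Option α) (x : α) : Option α :=
  match acc with
  | none => some x
  | some m => if f m < f x then some x else some m

theorem foldl_maxstep_decomp {α : Type} (f : α → Int) :
    ∀ (t : List α) (a m : α),
      List.foldl (mstep f) (some a) t = some m →
      m = a ∨ ∃ t1 t2, t = t1 ++ m :: t2 ∧ f a < f m ∧ ∀ y ∈ t1, f y < f m := by
  intro t
  induction t with
  | nil => intro a m h; simp at h; exact Or.inl h.symm
  | cons x t' ih =>
    intro a m h
    simp only [List.foldl_cons] at h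
    by_cases hc : f a < f x
    · simp [mstep, hc] at h
      rcases ih x m h with rfl | ⟨t1, t2, ht, hxm, ht1⟩
      · exact Or.inr ⟨[], t', by simp, hc, by simp⟩
      · exact Or.inr ⟨x :: t1, t2, by simp [ht], lt_trans hc hxm,
          by intro y hy; rcases List.mem_cons.mp hy with rfl | hy'
             · exact hxm
             · exact ht1 y hy'⟩
    · simp [mstep, hc] at h
      rcases ih a m h with rfl | ⟨t1, t2, ht, ham, ht1⟩
      · exact Or.inl rfl
      · exact Or.inr ⟨x :: t1, t2, by simp [ht], ham,
          by intro y hy; rcases List.mem_cons.mp hy with rfl | hy'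
             · exact lt_of_le_of_lt (not_lt.mp hc) ham
             · exact ht1 y hy'⟩

theorem max?_eq_foldl_mstep {α : Type} (f : α → Int) (l : List α) :
    PySem.List.max? l f = l.foldl (mstep f) none := by
  cases l with
  | nil => rfl
  | cons x t =>
    show PySem.List.max? (x :: t) f = List.foldl (mstep f) (some x) t
    simp only [PySem.List.max?]
    rfl

theorem max?_decomp {α : Type} (f : α → Int) {l : List α} {m : α}
    (h : PySem.List.max? l f = some m) :
    ∃ l1 l2, l = l1 ++ m :: l2 ∧ ∀ y ∈ l1, f y < f m := by
  cases l with
  | nil => simp [PySem.List.max?] at h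
  | cons x t =>
    have h' : List.foldl (mstep f) (some x) t = some m := by
      rw [max?_eq_foldl_mstep] at h
      simpa using h
    rcases foldl_maxstep_decomp f t x m h' with rfl | ⟨t1, t2, ht, hxm, ht1⟩
    · exact ⟨[], t, by simp⟩
    · exact ⟨x :: t1, t2, by simp [ht],
        by intro y hy; rcases List.mem_cons.mp hy with rfl | hy'
           · exact hxm
           · exact ht1 y hy'⟩

theorem idxOf_lt_of_pair_sublist {α : Type} [DecidableEq α] :
    ∀ {K : List α}, K.Nodup → ∀ {x y : α}, List.Sublist [x, y] K → K.idxOf x < K.idxOf y := by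
  intro K
  induction K with
  | nil => intro _ x y h; simp at h
  | cons k K' ih =>
    intro hnd x y h
    have hk : k ∉ K' := (List.nodup_cons.mp hnd).1
    have hnd' : K'.Nodup := (List.nodup_cons.mp hnd).2
    cases h with
    | cons _ h' =>
      have hx : x ∈ K' := h'.subset (by simp)
      have hy : y ∈ K' := h'.subset (by simp)
      have hxk : x ≠ k := fun e => hk (e ▸ hx)
      have hyk : y ≠ k := fun e => hk (e ▸ hy)
      have e1 : (k == x) = false := beq_eq_false_iff_ne.mpr (Ne.symm hxk)
      have e2 : (k == y) = false := beq_eq_false_iff_ne.mpr (Ne.symm hyk)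
      simp only [List.idxOf_cons, e1, e2, cond_false]
      have := ih hnd' h'
      omega
    | cons₂ _ h2 =>
      have hy : y ∈ K' := h2.subset (by simp)
      have hyk : y ≠ k := fun e => hk (e ▸ hy)
      have e2 : (k == y) = false := beq_eq_false_iff_ne.mpr (Ne.symm hyk)
      simp only [List.idxOf_cons, e2, cond_false, beq_self_eq_true, cond_true]
      omega

theorem first_sorted_eq_max_filter {α : Type} [DecidableEq α] (f : α → Int)
    (K S : List α) (hK : K.Nodup) (hperm : S.Perm K)
    (hpair : S.Pairwise (fun a b => f b < f a ∨ (f b = f a ∧ K.idxOf a < K.idxOf b)))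
    (p : α → Bool) :
    pyFirstMatch p S = PySem.List.max? (K.filter p) f := by
  have hmem : ∀ x, x ∈ S ↔ x ∈ K := fun x => hperm.mem_iff
  cases hL : pyFirstMatch p S with
  | none =>
    have hall : ∀ x ∈ S, p x = false := (pyFirstMatch_eq_none_iff p S).mp hL
    have : K.filter p = [] := by
      apply List.filter_eq_nil_iff.mpr
      intro x hx
      simp [hall x ((hmem x).mpr hx)]
    simp [this, PySem.List.max?]
  | some r =>
    obtain ⟨S1, S2, hSdec, hpr, hS1⟩ := pyFirstMatch_eq_some hL
    have hrK : r ∈ K := (hmem r).mp (by simp [hSdec])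
    have hrF : r ∈ K.filter p := List.mem_filter.mpr ⟨hrK, hpr⟩
    cases hR : PySem.List.max? (K.filter p) f with
    | none =>
      exfalso
      have : K.filter p = [] := (PySem.List.max?_eq_none_iff _ _).mp hR
      simp [this] at hrF
    | some m =>
      obtain ⟨F1, F2, hFdec, hF1⟩ := max?_decomp f hR
      have hmF : m ∈ K.filter p := by simp [hFdec]
      have hmK : m ∈ K := (List.mem_filter.mp hmF).1
      have hpm : p m = true := (List.mem_filter.mp hmF).2
      have hmax : ∀ y ∈ K.filter p, f y ≤ f m := PySem.List.max?_isMax hR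
      have hrm : f r ≤ f m := hmax r hrF
      by_contra hne
      have hne' : r ≠ m := fun e => hne (congrArg some e)
      have hmS : m ∈ S := (hmem m).mpr hmK
      have hmS2 : m ∈ S2 := by
        rcases (by simpa [hSdec] using hmS : m ∈ S1 ∨ m = r ∨ m ∈ S2) with h1 | h2 | h3
        · exact absurd hpm (by simp [hS1 m h1])
        · exact absurd h2.symm hne'
        · exact h3
      have hrel : f m < f r ∨ (f m = f r ∧ K.idxOf r < K.idxOf m) := by
        have := (List.pairwise_append.mp (hSdec ▸ hpair)).2.1
        exact (List.pairwise_cons.mp this).1 m hmS2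
      rcases hrel with hlt | ⟨heq, hidx⟩
      · exact absurd hrm (not_le.mpr hlt)
      · rcases (by simpa [hFdec] using hrF : r ∈ F1 ∨ r = m ∨ r ∈ F2) with h1 | h2 | h3
        · exact absurd (hF1 r h1) (by omega)
        · exact hne' h2
        · obtain ⟨F2a, F2b, hF2⟩ := List.append_of_mem h3
          have hsub : List.Sublist [m, r] K := by
            have h1 : List.Sublist [m, r] (m :: (F2a ++ r :: F2b)) :=
              List.Sublist.cons₂ m (List.singleton_sublist.mpr (by simp))
            have h2 : List.Sublist (m :: (F2a ++ r :: F2b)) K := by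
              have hf : List.Sublist (K.filter p) K := List.filter_sublist
              rw [hFdec, hF2] at hf
              exact List.Sublist.trans (List.sublist_append_right F1 _) hf
            exact h1.trans h2
          exact absurd (idxOf_lt_of_pair_sublist hK hsub) (by omega)

theorem kwList_nodup : kwList.Nodup := by decide

theorem kwSorted_perm : kwSorted.Perm kwList := by
  have := PySem.List.sorted_perm (xs := kwList) (key := PySem.Str.len) (rev := true)
  rw [hS] at this
  exact this

theorem kwSorted_pairwise :
    kwSorted.Pairwise (fun a b => PySem.Str.len b < PySem.Str.len a ∨
      (PySem.Str.len b = PySem.Str.len a ∧ kwList.idxOf a < kwList.idxOf b)) := by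
  decide

theorem key_equiv (s : String) :
    pyFirstMatch (fun k => PySem.Str.isIn k s) kwSorted =
      PySem.List.max? (kwList.filter (fun k => PySem.Str.isIn k s)) PySem.Str.len :=
  first_sorted_eq_max_filter PySem.Str.len kwList kwSorted kwList_nodup kwSorted_perm
    kwSorted_pairwise _

-- ===== B-side lemmas: the grouped running-best fold equals max? over the filtered flat list =====

-- the (best_len, best_dept) accumulator encodes mstep's Option accumulator
def encBest {α β : Type} (f : α → Int) (g : α → β) : Option α → Int × Option β
  | none => (0, none)
  | some m => (f m, some (g m))

theorem encBest_snd {α β : Type} (f : α → Int) (g : α → β) (o : Option α) :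
    (encBest f g o).2 = o.map g := by
  cases o <;> rfl

-- max? commutes with map when the key factors through the map
theorem foldl_mstep_map {α β : Type} (h : α → β) (f : β → Int) :
    ∀ (l : List α) (acc : Option α),
      (l.map h).foldl (mstep f) (acc.map h) = (l.foldl (mstep (fun x => f (h x))) acc).map h := by
  intro l
  induction l with
  | nil => intro acc; rfl
  | cons x t ih =>
    intro acc
    cases acc with
    | none => simpa using ih (some x)
    | some m =>
      simp only [List.map_cons, List.foldl_cons, Option.map_some, mstep]
      by_cases hc : f (h m) < f (h x)
      · rw [if_pos hc, if_pos hc]; simpa using ih (some x)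
      · rw [if_neg hc, if_neg hc]; simpa using ih (some m)

theorem max?_map {α β : Type} (h : α → β) (f : β → Int) (l : List α) :
    PySem.List.max? (l.map h) f = (PySem.List.max? l (fun x => f (h x))).map h := by
  rw [max?_eq_foldl_mstep, max?_eq_foldl_mstep]
  simpa using foldl_mstep_map h f l none

-- Source B's inner keyword loop over one group = the pair-step loop over the (kw, dept) pairs
theorem inner_loop (s d : String) :
    ∀ (kws : List String) (acc : Int × Option String),
      kws.foldl (fun acc kw =>
          if decide (acc.1 < PySem.Str.len kw) && PySem.Str.isIn kw s then (PySem.Str.len kw, some d) else acc) acc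
        = (kws.map (fun kw => (kw, d))).foldl (fun acc kv =>
            if decide (acc.1 < PySem.Str.len kv.1) && PySem.Str.isIn kv.1 s then (PySem.Str.len kv.1, some kv.2) else acc) acc := by
  intro kws
  induction kws with
  | nil => intro acc; rfl
  | cons x t ih =>
    intro acc
    simp only [List.foldl_cons, List.map_cons]
    exact ih _

-- Source B's nested group loop = the pair-step loop over the flattened (kw, dept) list
theorem group_loop (s : String) :
    ∀ (l : List (String × List String)) (acc : Int × Option String),
      l.foldl (fun acc g => g.2.foldl
          (fun acc kw =>
            if decide (acc.1 < PySem.Str.len kw) && PySem.Str.isIn kw s then (PySem.Str.len kw, some g.1) else acc)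
          acc) acc
        = (l.flatMap (fun g => g.2.map (fun kw => (kw, g.1)))).foldl
            (fun acc kv =>
              if decide (acc.1 < PySem.Str.len kv.1) && PySem.Str.isIn kv.1 s then (PySem.Str.len kv.1, some kv.2) else acc) acc := by
  intro l
  induction l with
  | nil => intro acc; rfl
  | cons g t ih =>
    intro acc
    simp only [List.foldl_cons, List.flatMap_cons, List.foldl_append]
    rw [inner_loop s g.1 g.2 acc]
    exact ih _

-- the pair-step loop (skip non-matches, replace only when strictly longer) is mstep over the filtered list
theorem step_loop (s : String) :
    ∀ (l : List (String × String)), (∀ kv ∈ l, 0 < PySem.Str.len kv.1) →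
      ∀ (acc : Option (String × String)),
      l.foldl (fun acc kv =>
          if decide (acc.1 < PySem.Str.len kv.1) && PySem.Str.isIn kv.1 s then (PySem.Str.len kv.1, some kv.2) else acc)
          (encBest (fun kv : String × String => PySem.Str.len kv.1) Prod.snd acc)
        = encBest (fun kv : String × String => PySem.Str.len kv.1) Prod.snd
            ((l.filter (fun kv => PySem.Str.isIn kv.1 s)).foldl
              (mstep (fun kv => PySem.Str.len kv.1)) acc) := by
  intro l
  induction l with
  | nil => intro _ acc; rfl
  | cons kv t ih =>
    intro hpos acc
    have hkv : 0 < PySem.Str.len kv.1 := hpos kv (by simp)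
    have ht : ∀ y ∈ t, 0 < PySem.Str.len y.1 := fun y hy => hpos y (by simp [hy])
    simp only [List.foldl_cons, List.filter_cons]
    cases hin : PySem.Str.isIn kv.1 s with
    | false =>
      simp only [Bool.and_false, Bool.false_eq_true, if_false]
      exact ih ht acc
    | true =>
      simp only [Bool.and_true]
      cases acc with
      | none =>
        rw [show encBest (fun kv : String × String => PySem.Str.len kv.1) Prod.snd none = (0, none) from rfl,
          if_pos (by simpa using hkv)]
        simpa [mstep] using ih ht (some kv)
      | some m =>
        by_cases hcn : m.1.length < kv.1.length
        · simpa [mstep, encBest, hcn] using ih ht (some kv)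
        · simpa [mstep, encBest, hcn] using ih ht (some m)

-- the grouped table flattens to exactly A's (keyword, department) items
theorem flat_groups_eq_items :
    deptGroups.flatMap (fun g => g.2.map (fun kw => (kw, g.1))) = deptItems := by decide

theorem items_pos_len : ∀ kv ∈ deptItems, 0 < PySem.Str.len kv.1 := by decide

theorem items_lookup : ∀ kv ∈ deptItems, (deptMap.get? kv.1).getD "" = kv.2 := by decide

-- B's bestDepartment = max? over the matching (keyword, department) pairs, projected to the department
theorem bestDepartment_eq_max? (s : String) :
    bestDepartment s
      = (PySem.List.max? (deptItems.filter (fun kv => PySem.Str.isIn kv.1 s))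
          (fun kv => PySem.Str.len kv.1)).map Prod.snd := by
  unfold bestDepartment
  rw [group_loop s deptGroups ((0 : Int), (none : Option String)), flat_groups_eq_items]
  have e : deptItems.foldl (fun acc kv =>
        if decide (acc.1 < PySem.Str.len kv.1) && PySem.Str.isIn kv.1 s then (PySem.Str.len kv.1, some kv.2) else acc)
        ((0 : Int), (none : Option String))
      = encBest (fun kv : String × String => PySem.Str.len kv.1) Prod.snd
          ((deptItems.filter (fun kv => PySem.Str.isIn kv.1 s)).foldl
            (mstep (fun kv => PySem.Str.len kv.1)) none) :=
    step_loop s deptItems items_pos_len none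
  rw [e, max?_eq_foldl_mstep]
  exact encBest_snd _ _ _

-- per-string bridge: B's best department is A's first sorted match sent through the dict
theorem best_eq_first (s : String) :
    bestDepartment s
      = (pyFirstMatch (fun k => PySem.Str.isIn k s) kwSorted).map (fun k => (deptMap.get? k).getD "") := by
  rw [key_equiv, bestDepartment_eq_max?]
  have hfm : kwList.filter (fun k => PySem.Str.isIn k s)
      = (deptItems.filter (fun kv => PySem.Str.isIn kv.1 s)).map Prod.fst := by
    unfold kwList
    rw [List.filter_map]
    rfl
  rw [hfm, max?_map]
  cases hm : PySem.List.max? (deptItems.filter (fun kv => PySem.Str.isIn kv.1 s))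
      (fun kv => PySem.Str.len kv.1) with
  | none => rfl
  | some m =>
    have hmem : m ∈ deptItems := List.filter_sublist.subset (PySem.List.max?_mem hm)
    simp [items_lookup m hmem]

-- ===== VERDICT (by name: the statement is the Claim_ definition above) =====
theorem classify_department_spec : Claim_equal_classify_department := by
  intro text category _
  unfold Spec_classify_department classify_department classify_department_alt
  simp only [hkeys, hS, best_eq_first]
  cases hpt : pyFirstMatch (fun keyword => PySem.Str.isIn keyword (PySem.Str.lower text)) kwSorted with
  | some k => simp
  | none =>
    by_cases hc : category = ""
    · simp [hc]
    · cases hpc : pyFirstMatch (fun keyword => PySem.Str.isIn keyword (PySem.Str.lower category)) kwSorted with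
      | some k => simp [hc]
      | none => simp [hc]
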